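-- pv_equiv track=rewrite | github.com/xiongzhp/Kinks | server/KF_mac/prosci/util/gaps.py | equals_ungapped
-- ===== SOURCE A (Python) =====
-- gapchars = "-/"
--
-- def equals_ungapped(a, b):
--     i=0
--     try:
--       for c in a:
--         if c in gapchars:
--           continue
--         while b[i] in gapchars:
--           i += 1
--         if c != b[i]:
--           return False
--         i += 1
--     except IndexError:
--       return False
--
--     while i < len(b):
--       if b[i] not in gapchars:
--         return False
--       i += 1
--
--     return True
-- ===== SOURCE B (Python) =====
-- gapchars = "-/"
--
-- def _ungap(s):
--     return ''.join(c for c in s if c not in gapchars)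
--
-- def equals_ungapped(a, b):
--     return _ungap(a) == _ungap(b)
-- ===== Notes on version B (the rewrite author's own statement) =====
-- stated objective: simpler
-- what changed: Replaced the interleaved two-pointer walk with try/except and a trailing while loop by filtering the gap characters out of each string independently and comparing the two filtered strings for equality.
import Mathlib
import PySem

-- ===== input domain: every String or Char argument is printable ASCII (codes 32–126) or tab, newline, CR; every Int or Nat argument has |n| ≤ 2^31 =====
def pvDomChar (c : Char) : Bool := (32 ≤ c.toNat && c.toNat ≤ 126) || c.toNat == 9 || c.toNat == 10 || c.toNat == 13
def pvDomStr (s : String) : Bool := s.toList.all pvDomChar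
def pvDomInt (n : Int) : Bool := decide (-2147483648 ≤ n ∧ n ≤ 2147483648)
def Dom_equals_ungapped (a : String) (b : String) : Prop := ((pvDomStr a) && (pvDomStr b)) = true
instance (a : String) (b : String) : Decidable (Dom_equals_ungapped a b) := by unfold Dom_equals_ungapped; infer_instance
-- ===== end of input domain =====

-- B replaces A's interleaved two-pointer walk (with try/except and a trailing while loop)
-- by filtering the gap characters out of each string and comparing the filtered strings (objective: simpler).

-- ===== PORT A =====
-- `c in gapchars` for gapchars = "-/"
def pvIsGap (c : Char) : Bool := c == '-' || c == '/'

-- the `while b[i] in gapchars: i += 1` loop, with `b[i]` on the remaining suffix of b;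
-- none = IndexError (caught in A as `return False`)
def pvSkipGaps : List Char → Option (Char × List Char)
  | [] => none
  | c :: rest => if pvIsGap c then pvSkipGaps rest else some (c, rest)

-- the trailing `while i < len(b)` loop over the remaining suffix of b
def pvTailLoop : List Char → Bool
  | [] => true
  | c :: rest => if !pvIsGap c then false else pvTailLoop rest

-- the `for c in a` loop; the forward-only index i into b is carried as b's remaining suffix
def pvMainLoop : List Char → List Char → Bool
  | [], bs => pvTailLoop bs
  | c :: rest, bs =>
    if pvIsGap c then pvMainLoop rest bs
    else
      match pvSkipGaps bs with
      | none => false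
      | some (bc, brest) => if c != bc then false else pvMainLoop rest brest

def equals_ungapped (a : String) (b : String) : Bool :=
  pvMainLoop a.toList b.toList

-- ===== PORT B =====
-- ''.join(c for c in s if c not in gapchars)
def pvUngap (s : String) : String :=
  String.ofList (s.toList.filter (fun c => !(c == '-' || c == '/')))

def equals_ungapped_alt (a : String) (b : String) : Bool :=
  pvUngap a == pvUngap b

-- ===== PRECONDITION & SPEC =====
def Spec_equals_ungapped (a : String) (b : String) (out : Bool) : Prop := out = equals_ungapped_alt a b
instance (a : String) (b : String) (out : Bool) : Decidable (Spec_equals_ungapped a b out) := by unfold Spec_equals_ungapped; infer_instance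

-- ===== CLAIM (what is proved, stated in full; the proofs are below) =====
def Claim_equal_equals_ungapped : Prop := ∀ (a : String) (b : String), Dom_equals_ungapped a b → Spec_equals_ungapped a b (equals_ungapped a b)

-- ===== LEMMAS AND PROOFS =====

theorem pvTailLoop_eq (bs : List Char) :
    pvTailLoop bs = (bs.filter (fun c => !pvIsGap c) == []) := by
  induction bs with
  | nil => rfl
  | cons c rest ih =>
    simp only [pvTailLoop, List.filter]
    cases h : pvIsGap c <;> simp [ih]

theorem pvSkipGaps_none (bs : List Char) (h : pvSkipGaps bs = none) :
    bs.filter (fun c => !pvIsGap c) = [] := by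
  induction bs with
  | nil => rfl
  | cons c rest ih =>
    simp only [pvSkipGaps] at h
    by_cases hg : pvIsGap c
    · simp [hg] at h; simp [List.filter, hg, ih h]
    · simp [hg] at h

theorem pvSkipGaps_some (bs : List Char) (bc : Char) (brest : List Char)
    (h : pvSkipGaps bs = some (bc, brest)) :
    bs.filter (fun c => !pvIsGap c) = bc :: brest.filter (fun c => !pvIsGap c) := by
  induction bs with
  | nil => simp [pvSkipGaps] at h
  | cons c rest ih =>
    simp only [pvSkipGaps] at h
    by_cases hg : pvIsGap c
    · simp [hg] at h; simp [List.filter, hg, ih h]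
    · simp [hg] at h
      obtain ⟨rfl, rfl⟩ := h
      simp [List.filter, hg]

theorem pvMainLoop_eq (as bs : List Char) :
    pvMainLoop as bs =
      (as.filter (fun c => !pvIsGap c) == bs.filter (fun c => !pvIsGap c)) := by
  induction as generalizing bs with
  | nil => simp [pvMainLoop, pvTailLoop_eq, BEq.comm]
  | cons c rest ih =>
    simp only [pvMainLoop, List.filter]
    by_cases hg : pvIsGap c
    · simp [hg, ih]
    · simp only [hg, Bool.not_false]
      cases hs : pvSkipGaps bs with
      | none =>
        simp [pvSkipGaps_none bs hs]
      | some p =>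
        obtain ⟨bc, brest⟩ := p
        rw [pvSkipGaps_some bs bc brest hs]
        by_cases hc : c = bc
        · simp [hc, ih]
        · simp [hc, bne_iff_ne]

-- ===== VERDICT (by name: the statement is the Claim_ definition above) =====
theorem equals_ungapped_spec : Claim_equal_equals_ungapped := by
  intro a b _
  unfold Spec_equals_ungapped equals_ungapped equals_ungapped_alt pvUngap
  rw [pvMainLoop_eq]
  simp [pvIsGap, String.ofList_inj]
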